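-- pv_equiv track=rewrite | github.com/weiyangzen/awesome_algorithms | Algorithms/数学-图论-0477-强连通分量_-_Kosaraju/demo.py | finish_order
-- ===== SOURCE A (Python) =====
-- from typing import Iterable, List, Sequence, Tuple
--
-- def finish_order(graph: Sequence[Sequence[int]]) -> List[int]:
--     """First DFS pass: collect nodes by finishing times (postorder)."""
--     n = len(graph)
--     visited = [False] * n
--     order: List[int] = []
--
--     for start in range(n):
--         if visited[start]:
--             continue
--
--         # Stack frame: (node, next_neighbor_index).
--         stack: List[Tuple[int, int]] = [(start, 0)]
--         visited[start] = True
--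
--         while stack:
--             node, next_idx = stack[-1]
--             if next_idx < len(graph[node]):
--                 nxt = graph[node][next_idx]
--                 stack[-1] = (node, next_idx + 1)
--                 if not visited[nxt]:
--                     visited[nxt] = True
--                     stack.append((nxt, 0))
--             else:
--                 order.append(node)
--                 stack.pop()
--
--     return order
-- ===== SOURCE B (Python) =====
-- def finish_order(graph):
--     """First DFS pass: postorder via a two-phase ("pop twice") stack.
--
--     Each node is pushed unexpanded; when popped the first time (and still
--     unvisited) it is marked, re-pushed as expanded, and its neighbors are
--     pushed in reverse; when popped expanded it is appended to the order.
--     Checking visited at pop time makes this yield the exact recursive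
--     DFS finishing order, without per-frame neighbor indices."""
--     n = len(graph)
--     visited = [False] * n
--     order = []
--     for start in range(n):
--         stack = [(start, False)]
--         while stack:
--             node, expanded = stack.pop()
--             if expanded:
--                 order.append(node)
--             elif not visited[node]:
--                 visited[node] = True
--                 stack.append((node, True))
--                 for nxt in reversed(graph[node]):
--                     stack.append((nxt, False))
--     return order
-- ===== Notes on version B (the rewrite author's own statement) =====
-- stated objective: alternative
-- what changed: Replaces A's stack of (node, next_neighbor_index) frames that resumes a node after each neighbor by the two-phase 'pop twice' stack: each node is pushed unexpanded, and when popped it is either appended (expanded), skipped (already visited), or marked, re-pushed expanded and its neighbors pushed in reverse; checking visited at pop time yields the identical DFS finishing order.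
import Mathlib
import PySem

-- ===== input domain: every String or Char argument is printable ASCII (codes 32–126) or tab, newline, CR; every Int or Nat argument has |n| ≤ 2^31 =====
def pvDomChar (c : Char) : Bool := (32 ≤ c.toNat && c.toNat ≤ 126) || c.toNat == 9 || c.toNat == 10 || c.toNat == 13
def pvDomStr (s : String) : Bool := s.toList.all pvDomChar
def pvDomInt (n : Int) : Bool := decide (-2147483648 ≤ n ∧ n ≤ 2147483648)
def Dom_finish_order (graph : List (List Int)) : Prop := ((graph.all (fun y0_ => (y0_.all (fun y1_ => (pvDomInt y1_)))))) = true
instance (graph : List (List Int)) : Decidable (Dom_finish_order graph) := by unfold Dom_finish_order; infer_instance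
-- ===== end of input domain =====

-- B replaces A's stack of (node, next_neighbor_index) frames by the two-phase "pop twice" stack
-- (alternative discipline, same DFS finishing order); fuel in both ports only guards totality.

-- shared index helpers: Python's visited[j] / graph[j] (negative j counts from the end;
-- the out-of-range default is never reached under Pre_, where Python would raise IndexError)
def vget (v : List Bool) (j : Int) : Bool := PySem.List.pyGetD v j true
def vset (v : List Bool) (j : Int) : List Bool := PySem.List.pySetD v j true
def gget (g : List (List Int)) (j : Int) : List Int := PySem.List.pyGetD g j []

-- ===== PORT A =====
-- the 'while stack:' loop; fuel only guards totality (generous bound, never reached under Pre_)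
def whileA (g : List (List Int)) : Nat → List (Int × Nat) → List Bool → List Int → List Bool × List Int
  | 0, _, v, o => (v, o)
  | _ + 1, [], v, o => (v, o)
  | f + 1, (node, i) :: rest, v, o =>
    let nbrs := gget g node
    if h : i < nbrs.length then
      let nxt := nbrs[i]
      if vget v nxt then whileA g f ((node, i + 1) :: rest) v o
      else whileA g f ((nxt, 0) :: (node, i + 1) :: rest) (vset v nxt) o
    else whileA g f rest v (o ++ [node])

def finish_order (graph : List (List Int)) : List Int :=
  let n := graph.length
  let F := n + (graph.map List.length).sum + 1
  ((PySem.List.pyRange 0 n 1).foldl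
    (fun (st : List Bool × List Int) start =>
      if vget st.1 start then st
      else whileA graph F [(start, 0)] (vset st.1 start) st.2)
    (List.replicate n false, [])).2

-- ===== PORT B =====
-- two-phase stack: pop (node, expanded); expanded → append node to the order;
-- unexpanded and unvisited → mark, re-push (node, true), then push the neighbors in
-- reverse ('for nxt in reversed(graph[node]): stack.append(...)' = the foldl below,
-- stack head = top); unexpanded and visited → discard the frame.
def whileB (g : List (List Int)) : Nat → List (Int × Bool) → List Bool → List Int → List Bool × List Int
  | 0, _, v, o => (v, o)
  | _ + 1, [], v, o => (v, o)
  | f + 1, (node, true) :: rest, v, o => whileB g f rest v (o ++ [node])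
  | f + 1, (node, false) :: rest, v, o =>
    if vget v node then whileB g f rest v o
    else whileB g f
      ((gget g node).reverse.foldl (fun s x => (x, false) :: s) ((node, true) :: rest))
      (vset v node) o

def finish_order_alt (graph : List (List Int)) : List Int :=
  let n := graph.length
  let F := n + (graph.map List.length).sum + 2
  ((PySem.List.pyRange 0 n 1).foldl
    (fun (st : List Bool × List Int) start =>
      whileB graph F [(start, false)] st.1 st.2)
    (List.replicate n false, [])).2

-- ===== PRECONDITION & SPEC =====
-- Pre_ excludes exactly the graphs with a neighbor entry outside [-n, n), on which Python A
-- (and B) raises IndexError when indexing 'visited'.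
def Pre_finish_order (graph : List (List Int)) : Prop :=
  ∀ nbrs ∈ graph, ∀ x ∈ nbrs, -(graph.length : Int) ≤ x ∧ x < (graph.length : Int)
instance (graph : List (List Int)) : Decidable (Pre_finish_order graph) := by
  unfold Pre_finish_order; infer_instance

def pvWitness_finish_order : List (List Int) := [[1], [0, 2], [-3]]

def Spec_finish_order (graph : List (List Int)) (out : List Int) : Prop := out = finish_order_alt graph
instance (graph : List (List Int)) (out : List Int) : Decidable (Spec_finish_order graph out) := by unfold Spec_finish_order; infer_instance

-- ===== CLAIM (what is proved, stated in full; the proofs are below) =====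
def Claim_equal_finish_order : Prop := ∀ (graph : List (List Int)), Dom_finish_order graph → Pre_finish_order graph → Spec_finish_order graph (finish_order graph)

-- ===== LEMMAS AND PROOFS =====

-- reference recursive DFS both ports are reduced to: visit node's remaining neighbors in
-- order, descend into unvisited ones, append node on return; leftover fuel is returned
def dfsR (g : List (List Int)) : Nat → Int → List Int → List Bool → List Int → Nat × List Bool × List Int
  | 0, _, _, v, o => (0, v, o)
  | f + 1, node, [], v, o => (f, v, o ++ [node])
  | f + 1, node, nxt :: rest, v, o =>
    if vget v nxt then dfsR g f node rest v o
    else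
      let r := dfsR g f nxt (gget g nxt) (vset v nxt) o
      dfsR g (min r.1 f) node rest r.2.1 r.2.2
termination_by f => f
decreasing_by all_goals omega

-- the leftover fuel dfsR returns never exceeds the fuel it was given
theorem dfsR_fuel_le (g : List (List Int)) :
    ∀ (f : Nat) (node : Int) (nbrs : List Int) (v : List Bool) (o : List Int),
      (dfsR g f node nbrs v o).1 ≤ f := by
  intro f
  induction f using Nat.strong_induction_on with
  | _ f ih =>
    intro node nbrs v o
    match f, nbrs with
    | 0, _ => simp [dfsR]
    | f + 1, [] => simp [dfsR]
    | f + 1, nxt :: rest =>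
      simp only [dfsR]
      split
      · exact le_trans (ih f (by omega) node rest v o) (by omega)
      · exact le_trans (ih _ (by omega) node rest _ _) (by omega)

-- A-side simulation: one explicit frame (node, i) of A's stack behaves exactly like the
-- reference DFS on node's neighbors from index i, then the loop continues on the rest
theorem simA (g : List (List Int)) :
    ∀ (f : Nat) (node : Int) (i : Nat) (rest : List (Int × Nat)) (v : List Bool) (o : List Int),
      whileA g f ((node, i) :: rest) v o =
        (fun r => whileA g r.1 rest r.2.1 r.2.2)
          (dfsR g f node ((gget g node).drop i) v o) := by
  intro f
  induction f using Nat.strong_induction_on with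
  | _ f ih =>
    intro node i rest v o
    match f with
    | 0 => simp [whileA, dfsR]
    | f + 1 =>
      by_cases h : i < (gget g node).length
      · have hdrop : (gget g node).drop i = (gget g node)[i] :: (gget g node).drop (i + 1) :=
          List.drop_eq_getElem_cons h
        rw [hdrop]
        simp only [whileA, dif_pos h, dfsR]
        by_cases hv : vget v ((gget g node)[i])
        · rw [if_pos hv, if_pos hv, ih f (by omega)]
        · rw [if_neg hv, if_neg hv]
          rw [ih f (by omega)]
          simp only [List.drop_zero]
          have hle := dfsR_fuel_le g f ((gget g node)[i]) (gget g ((gget g node)[i]))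
            (vset v ((gget g node)[i])) o
          rw [ih _ (by omega)]
          rw [Nat.min_eq_left hle]
      · have hdrop : (gget g node).drop i = [] := List.drop_eq_nil_of_le (by omega)
        rw [hdrop]
        simp [whileA, dfsR, h]

-- whileA on the empty stack is the identity on the state, for every fuel
theorem whileA_nil (g : List (List Int)) (f : Nat) (v : List Bool) (o : List Int) :
    whileA g f [] v o = (v, o) := by
  cases f <;> simp [whileA]

-- whileB on the empty stack is the identity on the state, for every fuel
theorem whileB_nil (g : List (List Int)) (f : Nat) (v : List Bool) (o : List Int) :
    whileB g f [] v o = (v, o) := by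
  cases f <;> simp [whileB]

-- pushing l in reverse onto a cons-as-push stack leaves l's frames on top in order
theorem push_reverse (l : List Int) (acc : List (Int × Bool)) :
    l.reverse.foldl (fun s x => (x, false) :: s) acc
      = l.map (fun x => (x, false)) ++ acc := by
  induction l generalizing acc with
  | nil => rfl
  | cons a l ih => simp [List.foldl_append, ih]

-- B-side simulation: the frames "node's pending neighbors, then (node, true)" on top of
-- B's stack behave exactly like the reference DFS on those neighbors
theorem simB (g : List (List Int)) :
    ∀ (f : Nat) (node : Int) (nbrs : List Int) (rest : List (Int × Bool)) (v : List Bool) (o : List Int),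
      whileB g f (nbrs.map (fun x => (x, false)) ++ (node, true) :: rest) v o =
        (fun r => whileB g r.1 rest r.2.1 r.2.2)
          (dfsR g f node nbrs v o) := by
  intro f
  induction f using Nat.strong_induction_on with
  | _ f ih =>
    intro node nbrs rest v o
    match f, nbrs with
    | 0, nbrs => cases nbrs <;> simp [whileB, dfsR]
    | f + 1, [] => simp [whileB, dfsR]
    | f + 1, nxt :: nbrs' =>
      simp only [List.map_cons, List.cons_append, whileB, dfsR]
      by_cases hv : vget v nxt
      · rw [if_pos hv, if_pos hv, ih f (by omega)]
      · rw [if_neg hv, if_neg hv, push_reverse]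
        have hle := dfsR_fuel_le g f nxt (gget g nxt) (vset v nxt) o
        rw [Nat.min_eq_left hle, ih f (by omega)]
        dsimp only
        rw [ih (dfsR g f nxt (gget g nxt) (vset v nxt) o).1 (by omega)]

-- ===== VERDICT (by name: the statement is the Claim_ definition above) =====
theorem finish_order_spec : Claim_equal_finish_order := by
  intro graph _ _
  unfold Spec_finish_order finish_order finish_order_alt
  dsimp only
  congr 1
  apply PySem.List.foldl_congr_mem
  intro st start _
  have hF : graph.length + (graph.map List.length).sum + 2
      = (graph.length + (graph.map List.length).sum + 1) + 1 := by omega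
  rw [hF]
  by_cases hv : vget st.1 start
  · simp [whileB, hv]
  · rw [if_neg hv]
    have hstep : whileB graph ((graph.length + (graph.map List.length).sum + 1) + 1)
        [(start, false)] st.1 st.2
      = whileB graph (graph.length + (graph.map List.length).sum + 1)
          ((gget graph start).reverse.foldl (fun s x => (x, false) :: s) [(start, true)])
          (vset st.1 start) st.2 := by simp [whileB, hv]
    rw [hstep, push_reverse]
    have hB := simB graph (graph.length + (graph.map List.length).sum + 1) start
      (gget graph start) [] (vset st.1 start) st.2
    rw [hB]
    dsimp only
    rw [whileB_nil]
    have hA := simA graph (graph.length + (graph.map List.length).sum + 1) start 0 []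
      (vset st.1 start) st.2
    simp only [List.drop_zero] at hA
    rw [hA, whileA_nil]
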